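-- pv_equiv track=rewrite | github.com/AnngHack/VulnSpiral | vulnspiral/server.py | _parse_port_ranges
-- ===== SOURCE A (Python) =====
-- from typing import List, Optional, Dict, Any, Literal, Set
--
-- def _parse_port_ranges(spec: str) -> List[int]:
--     ports: Set[int] = set()
--     for part in (spec or "").split(","):
--         part = part.strip()
--         if not part:
--             continue
--         if "-" in part:
--             a, b = part.split("-", 1)
--             try:
--                 lo, hi = int(a), int(b)
--                 for p in range(max(1, lo), min(65535, hi) + 1):
--                     ports.add(p)
--             except Exception:
--                 continue
--         else:
--             try:
--                 p = int(part)
--                 if 1 <= p <= 65535: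
--                     ports.add(p)
--             except Exception:
--                 continue
--     return sorted(ports)
-- ===== SOURCE B (Python) =====
-- from typing import List, Optional, Tuple
--
--
-- def _part_interval(part: str) -> Optional[Tuple[int, int]]:
--     part = part.strip()
--     if not part:
--         return None
--     if "-" in part:
--         a, b = part.split("-", 1)
--         try:
--             lo, hi = int(a), int(b)
--         except Exception:
--             return None
--         lo = max(1, lo)
--         hi = min(65535, hi)
--         return (lo, hi) if lo <= hi else None
--     try:
--         p = int(part)
--     except Exception:
--         return None
--     return (p, p) if 1 <= p <= 65535 else None
--
--
-- def _parse_port_ranges(spec: str) -> List[int]: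
--     intervals = [iv for iv in map(_part_interval, (spec or "").split(",")) if iv is not None]
--     intervals.sort(key=lambda iv: iv[0])
--     merged = []
--     cur = None
--     for lo, hi in intervals:
--         if cur is None:
--             cur = (lo, hi)
--         elif lo <= cur[1] + 1:
--             cur = (cur[0], max(cur[1], hi))
--         else:
--             merged.append(cur)
--             cur = (lo, hi)
--     if cur is not None:
--         merged.append(cur)
--     out: List[int] = []
--     for lo, hi in merged:
--         out.extend(range(lo, hi + 1))
--     return out
-- ===== Notes on version B (the rewrite author's own statement) =====
-- stated objective: faster
-- what changed: Instead of expanding every range into a shared set (re-adding each port once per overlapping range) and sorting the set, B parses each part into a clamped interval, sorts the intervals by their low end, merges overlapping/adjacent ones in one pass, and enumerates each merged interval exactly once.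
import Mathlib
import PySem

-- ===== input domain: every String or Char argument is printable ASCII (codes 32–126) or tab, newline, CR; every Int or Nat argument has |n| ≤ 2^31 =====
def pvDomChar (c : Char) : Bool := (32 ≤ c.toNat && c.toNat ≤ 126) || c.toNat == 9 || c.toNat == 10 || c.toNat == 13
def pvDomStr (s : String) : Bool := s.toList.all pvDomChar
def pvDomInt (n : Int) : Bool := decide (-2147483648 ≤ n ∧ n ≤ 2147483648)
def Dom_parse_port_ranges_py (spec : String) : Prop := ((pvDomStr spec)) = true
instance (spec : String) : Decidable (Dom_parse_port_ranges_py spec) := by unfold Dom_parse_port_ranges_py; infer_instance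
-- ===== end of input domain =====

-- B replaces A's per-port set insertion (each overlapping range re-expanded into the set) by
-- sort-by-low-end + one merge pass over clamped intervals, enumerating each merged interval once.

-- ===== PORT A =====
-- one iteration of A's 'for part in (spec or "").split(",")' loop over the shared set
def pa_step (s : PySem.Set Int) (part0 : String) : PySem.Set Int :=
  let part := PySem.Str.strip part0
  if part = "" then s
  else if PySem.Str.isIn "-" part then
    match PySem.Str.splitMax? part "-" 1 with
    | some (a :: b :: _) =>
      match PySem.Int.ofStr? a, PySem.Int.ofStr? b with
      | some lo, some hi =>
          (PySem.List.pyRange (max 1 lo) (min 65535 hi + 1) 1).foldl PySem.Set.add s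
      | _, _ => s
    | _ => s
  else
    match PySem.Int.ofStr? part with
    | some p => if 1 ≤ p ∧ p ≤ 65535 then PySem.Set.add s p else s
    | none => s

def parse_port_ranges_py (spec : String) : List Int :=
  PySem.List.sorted
    (((PySem.Str.split? spec ",").getD []).foldl pa_step PySem.Set.empty)
    (fun x => x) false

-- ===== PORT B =====
-- Source B's _part_interval: a part as an optional clamped interval
def pv_partInterval (part0 : String) : Option (Int × Int) :=
  let part := PySem.Str.strip part0
  if part = "" then none
  else if PySem.Str.isIn "-" part then
    match PySem.Str.splitMax? part "-" 1 with
    | some (a :: b :: _) =>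
      match PySem.Int.ofStr? a, PySem.Int.ofStr? b with
      | some lo, some hi =>
          if max 1 lo ≤ min 65535 hi then some (max 1 lo, min 65535 hi) else none
      | _, _ => none
    | _ => none
  else
    match PySem.Int.ofStr? part with
    | some p => if 1 ≤ p ∧ p ≤ 65535 then some (p, p) else none
    | none => none

-- one iteration of Source B's merge loop (state: finished intervals, current interval)
def pv_mergeStep (st : List (Int × Int) × Option (Int × Int)) (iv : Int × Int) :
    List (Int × Int) × Option (Int × Int) :=
  match st.2 with
  | none => (st.1, some iv)
  | some cur =>
      if iv.1 ≤ cur.2 + 1 then (st.1, some (cur.1, max cur.2 iv.2))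
      else (st.1 ++ [cur], some iv)

-- the trailing 'if cur is not None: merged.append(cur)'
def pv_mergeFinish (st : List (Int × Int) × Option (Int × Int)) : List (Int × Int) :=
  match st.2 with
  | none => st.1
  | some cur => st.1 ++ [cur]

def parse_port_ranges_py_alt (spec : String) : List Int :=
  let intervals := ((PySem.Str.split? spec ",").getD []).filterMap pv_partInterval
  let sortedIvs := PySem.List.sorted intervals (fun iv => iv.1) false
  let merged := pv_mergeFinish (sortedIvs.foldl pv_mergeStep ([], none))
  merged.flatMap (fun iv => PySem.List.pyRange iv.1 (iv.2 + 1) 1)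

-- ===== PRECONDITION & SPEC =====
def Spec_parse_port_ranges_py (spec : String) (out : List Int) : Prop := out = parse_port_ranges_py_alt spec
instance (spec : String) (out : List Int) : Decidable (Spec_parse_port_ranges_py spec out) := by unfold Spec_parse_port_ranges_py; infer_instance

-- ===== CLAIM (what is proved, stated in full; the proofs are below) =====
def Claim_equal_parse_port_ranges_py : Prop := ∀ (spec : String), Dom_parse_port_ranges_py spec → Spec_parse_port_ranges_py spec (parse_port_ranges_py spec)

-- ===== LEMMAS AND PROOFS =====

-- x is covered by one of the intervals
def pvCovers (ivs : List (Int × Int)) (x : Int) : Prop := ∃ iv ∈ ivs, iv.1 ≤ x ∧ x ≤ iv.2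

theorem pvCovers_nil (x : Int) : pvCovers [] x ↔ False := by simp [pvCovers]

theorem pvCovers_cons (iv : Int × Int) (r : List (Int × Int)) (x : Int) :
    pvCovers (iv :: r) x ↔ (iv.1 ≤ x ∧ x ≤ iv.2) ∨ pvCovers r x := by
  simp [pvCovers, or_and_right, exists_or]

theorem pvCovers_append (a b : List (Int × Int)) (x : Int) :
    pvCovers (a ++ b) x ↔ pvCovers a x ∨ pvCovers b x := by
  simp [pvCovers, or_and_right, exists_or]

theorem pv_partInterval_valid {part : String} {l h : Int}
    (hp : pv_partInterval part = some (l, h)) : l ≤ h := by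
  simp only [pv_partInterval] at hp
  repeat' split at hp
  all_goals simp_all
  all_goals omega

-- A's inner 'for p in range(...): ports.add(p)' is a Set.update
theorem pv_foldl_add_update (l : List Int) (s : PySem.Set Int) :
    l.foldl PySem.Set.add s = PySem.Set.update s l := rfl

theorem pa_step_mem (s : PySem.Set Int) (part : String) (x : Int) :
    x ∈ pa_step s part ↔
      x ∈ s ∨ ∃ l h : Int, pv_partInterval part = some (l, h) ∧ l ≤ x ∧ x ≤ h := by
  simp only [pa_step, pv_partInterval]
  repeat' split
  all_goals
    simp [pv_foldl_add_update, PySem.Set.mem_update, PySem.List.mem_pyRange_one,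
      PySem.Set.mem_add]
  all_goals try omega
  all_goals (constructor <;> rintro (h | h) <;> simp_all <;> omega)

theorem pa_step_nodup (s : PySem.Set Int) (part : String) (hs : s.Nodup) :
    (pa_step s part).Nodup := by
  simp only [pa_step]
  repeat' split
  all_goals first
    | exact hs
    | (rw [pv_foldl_add_update]; exact PySem.Set.nodup_update _ _ hs)
    | exact PySem.Set.nodup_add s _ hs

theorem pa_fold_mem (parts : List String) (s : PySem.Set Int) (x : Int) :
    x ∈ parts.foldl pa_step s ↔ x ∈ s ∨ pvCovers (parts.filterMap pv_partInterval) x := by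
  induction parts generalizing s with
  | nil => simp [pvCovers]
  | cons p rest ih =>
    simp only [List.foldl_cons, ih, pa_step_mem, List.filterMap_cons]
    cases hp : pv_partInterval p with
    | none => simp
    | some iv =>
      cases iv with
      | mk l h =>
        simp only [pvCovers, List.mem_cons, Option.some.injEq, Prod.mk.injEq]
        constructor
        · rintro ((hx | ⟨l', h', ⟨hl, hh⟩, hle⟩) | ⟨jv, hjv, hc⟩)
          · exact Or.inl hx
          · exact Or.inr ⟨(l, h), Or.inl rfl, by simp_all⟩
          · exact Or.inr ⟨jv, Or.inr hjv, hc⟩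
        · rintro (hx | ⟨jv, (rfl | hjv), hc⟩)
          · exact Or.inl (Or.inl hx)
          · exact Or.inl (Or.inr ⟨l, h, ⟨rfl, rfl⟩, hc⟩)
          · exact Or.inr ⟨jv, hjv, hc⟩

theorem pa_fold_nodup (parts : List String) (s : PySem.Set Int) (hs : s.Nodup) :
    (parts.foldl pa_step s).Nodup := by
  induction parts generalizing s with
  | nil => exact hs
  | cons p rest ih => exact ih _ (pa_step_nodup _ _ hs)

theorem pv_merge_go (ivs : List (Int × Int)) (done : List (Int × Int)) (clo chi : Int)
    (h1 : ∀ iv ∈ ivs, iv.1 ≤ iv.2)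
    (h2 : ivs.Pairwise (fun p q => p.1 ≤ q.1))
    (h3 : ∀ iv ∈ ivs, clo ≤ iv.1)
    (h4 : clo ≤ chi)
    (h5 : (done ++ [(clo, chi)]).Pairwise (fun p q => p.2 + 1 < q.1))
    (h6 : ∀ d ∈ done, d.1 ≤ d.2)
    (h7 : ∀ d ∈ done, ∀ iv ∈ ivs, d.2 + 1 < iv.1) :
    (∀ d ∈ pv_mergeFinish (ivs.foldl pv_mergeStep (done, some (clo, chi))), d.1 ≤ d.2) ∧
    (pv_mergeFinish (ivs.foldl pv_mergeStep (done, some (clo, chi)))).Pairwise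
      (fun p q => p.2 + 1 < q.1) ∧
    (∀ x, pvCovers (pv_mergeFinish (ivs.foldl pv_mergeStep (done, some (clo, chi)))) x ↔
      (pvCovers done x ∨ (clo ≤ x ∧ x ≤ chi) ∨ pvCovers ivs x)) := by
  induction ivs generalizing done clo chi with
  | nil =>
    simp only [List.foldl_nil, pv_mergeFinish]
    refine ⟨?_, h5, ?_⟩
    · intro d hd
      rcases List.mem_append.mp hd with hmem | hmem
      · exact h6 d hmem
      · simp only [List.mem_singleton] at hmem; subst hmem; exact h4
    · intro x
      rw [pvCovers_append, pvCovers_cons, pvCovers_nil]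
  | cons iv rest ih =>
    obtain ⟨lo, hi⟩ := iv
    have hlohi : lo ≤ hi := h1 _ (List.mem_cons_self ..)
    have hclo : clo ≤ lo := h3 _ (List.mem_cons_self ..)
    have hrest_lo : ∀ jv ∈ rest, lo ≤ jv.1 :=
      fun jv hjv => (List.pairwise_cons.mp h2).1 jv hjv
    simp only [List.foldl_cons]
    by_cases hcase : lo ≤ chi + 1
    · rw [show pv_mergeStep (done, some (clo, chi)) (lo, hi)
            = (done, some (clo, max chi hi)) from by simp [pv_mergeStep, hcase]]
      obtain ⟨g1, g2, g3⟩ := ih done clo (max chi hi)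
        (fun jv hjv => h1 _ (List.mem_cons_of_mem _ hjv)) h2.tail
        (fun jv hjv => le_trans hclo (hrest_lo jv hjv))
        (le_trans h4 (le_max_left _ _))
        (by
          rw [List.pairwise_append] at h5 ⊢
          obtain ⟨ha, hb, hc⟩ := h5
          refine ⟨ha, List.pairwise_singleton _ _, fun d hd e he => ?_⟩
          simp only [List.mem_singleton] at he; subst he
          exact hc d hd (clo, chi) (List.mem_singleton_self _))
        h6
        (fun d hd jv hjv => h7 d hd jv (List.mem_cons_of_mem _ hjv))
      refine ⟨g1, g2, fun x => ?_⟩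
      rw [g3 x, pvCovers_cons]
      have hmid : (clo ≤ x ∧ x ≤ max chi hi) ↔
          (clo ≤ x ∧ x ≤ chi) ∨ (lo ≤ x ∧ x ≤ hi) := by
        constructor <;> intro hx <;> omega
      tauto
    · rw [show pv_mergeStep (done, some (clo, chi)) (lo, hi)
            = (done ++ [(clo, chi)], some (lo, hi)) from by simp [pv_mergeStep, hcase]]
      have hdlt : ∀ d ∈ done ++ [(clo, chi)], d.2 + 1 < lo := by
        intro d hd
        rcases List.mem_append.mp hd with hmem | hmem
        · exact h7 d hmem _ (List.mem_cons_self ..)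
        · simp only [List.mem_singleton] at hmem; subst hmem; omega
      obtain ⟨g1, g2, g3⟩ := ih (done ++ [(clo, chi)]) lo hi
        (fun jv hjv => h1 _ (List.mem_cons_of_mem _ hjv)) h2.tail hrest_lo hlohi
        (by
          rw [List.pairwise_append]
          exact ⟨h5, List.pairwise_singleton _ _,
            fun d hd e he => by
              simp only [List.mem_singleton] at he; subst he; exact hdlt d hd⟩)
        (by
          intro d hd
          rcases List.mem_append.mp hd with hmem | hmem
          · exact h6 d hmem
          · simp only [List.mem_singleton] at hmem; subst hmem; exact h4)
        (fun d hd jv hjv => lt_of_lt_of_le (hdlt d hd) (hrest_lo jv hjv))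
      refine ⟨g1, g2, fun x => ?_⟩
      rw [g3 x, pvCovers_append, pvCovers_cons, pvCovers_cons, pvCovers_nil]
      tauto

theorem pv_merge_spec (ivs : List (Int × Int))
    (h1 : ∀ iv ∈ ivs, iv.1 ≤ iv.2)
    (h2 : ivs.Pairwise (fun p q => p.1 ≤ q.1)) :
    (∀ d ∈ pv_mergeFinish (ivs.foldl pv_mergeStep ([], none)), d.1 ≤ d.2) ∧
    (pv_mergeFinish (ivs.foldl pv_mergeStep ([], none))).Pairwise (fun p q => p.2 + 1 < q.1) ∧
    (∀ x, pvCovers (pv_mergeFinish (ivs.foldl pv_mergeStep ([], none))) x ↔ pvCovers ivs x) := by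
  cases ivs with
  | nil => simp [pv_mergeFinish, pvCovers]
  | cons iv rest =>
    obtain ⟨lo, hi⟩ := iv
    rw [show ((lo, hi) :: rest).foldl pv_mergeStep ([], none)
          = rest.foldl pv_mergeStep ([], some (lo, hi)) from rfl]
    obtain ⟨g1, g2, g3⟩ := pv_merge_go rest [] lo hi
      (fun jv hjv => h1 _ (List.mem_cons_of_mem _ hjv)) h2.tail
      (fun jv hjv => (List.pairwise_cons.mp h2).1 jv hjv)
      (h1 _ (List.mem_cons_self ..))
      (by simp)
      (by simp)
      (by simp)
    refine ⟨g1, g2, fun x => ?_⟩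
    rw [g3 x, pvCovers_cons, pvCovers_nil]
    tauto

theorem pv_expand_mem (r : List (Int × Int)) (x : Int) :
    x ∈ r.flatMap (fun iv => PySem.List.pyRange iv.1 (iv.2 + 1) 1) ↔ pvCovers r x := by
  simp only [List.mem_flatMap, pvCovers, PySem.List.mem_pyRange_one]
  constructor
  · rintro ⟨iv, hiv, ha, hb⟩; exact ⟨iv, hiv, ha, by omega⟩
  · rintro ⟨iv, hiv, ha, hb⟩; exact ⟨iv, hiv, ha, by omega⟩

theorem pv_expand_pairwise (r : List (Int × Int))
    (hg : r.Pairwise (fun p q => p.2 + 1 < q.1)) :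
    (r.flatMap (fun iv => PySem.List.pyRange iv.1 (iv.2 + 1) 1)).Pairwise (· < ·) := by
  induction r with
  | nil => simp
  | cons iv rest ih =>
    rw [List.flatMap_cons, List.pairwise_append]
    refine ⟨PySem.List.pairwise_lt_pyRange_one _ _, ih hg.tail, ?_⟩
    intro y hy z hz
    rw [PySem.List.mem_pyRange_one] at hy
    rw [List.mem_flatMap] at hz
    obtain ⟨jv, hjv, hzj⟩ := hz
    rw [PySem.List.mem_pyRange_one] at hzj
    have := (List.pairwise_cons.mp hg).1 jv hjv
    omega

-- ===== VERDICT (by name: the statement is the Claim_ definition above) =====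
theorem parse_port_ranges_py_spec : Claim_equal_parse_port_ranges_py := by
  intro spec _
  show parse_port_ranges_py spec = parse_port_ranges_py_alt spec
  simp only [parse_port_ranges_py, parse_port_ranges_py_alt]
  have hval : ∀ iv ∈ PySem.List.sorted
      (((PySem.Str.split? spec ",").getD []).filterMap pv_partInterval)
      (fun iv => iv.1) false, iv.1 ≤ iv.2 := by
    intro iv hiv
    rw [PySem.List.mem_sorted, List.mem_filterMap] at hiv
    obtain ⟨part, _, hp⟩ := hiv
    obtain ⟨l, h⟩ := iv
    exact pv_partInterval_valid hp
  obtain ⟨g1, g2, g3⟩ := pv_merge_spec _ hval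
    (PySem.List.sorted_pairwise _ _)
  have hBpw := pv_expand_pairwise _ g2
  have hBnd : (pv_mergeFinish
      ((PySem.List.sorted (((PySem.Str.split? spec ",").getD []).filterMap pv_partInterval)
        (fun iv => iv.1) false).foldl pv_mergeStep ([], none))).flatMap
      (fun iv => PySem.List.pyRange iv.1 (iv.2 + 1) 1) |>.Nodup :=
    List.Pairwise.imp (fun h => ne_of_lt h) hBpw
  have hAnd : (((PySem.Str.split? spec ",").getD []).foldl pa_step PySem.Set.empty).Nodup :=
    pa_fold_nodup _ _ List.nodup_nil
  have hmem : ∀ x : Int,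
      x ∈ (pv_mergeFinish
        ((PySem.List.sorted (((PySem.Str.split? spec ",").getD []).filterMap pv_partInterval)
          (fun iv => iv.1) false).foldl pv_mergeStep ([], none))).flatMap
        (fun iv => PySem.List.pyRange iv.1 (iv.2 + 1) 1) ↔
      x ∈ ((PySem.Str.split? spec ",").getD []).foldl pa_step PySem.Set.empty := by
    intro x
    rw [pv_expand_mem, g3 x, pa_fold_mem]
    simp only [PySem.Set.empty, List.not_mem_nil, false_or]
    constructor
    · intro hc
      obtain ⟨iv, hiv, hb⟩ := hc
      rw [PySem.List.mem_sorted] at hiv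
      exact ⟨iv, hiv, hb⟩
    · intro hc
      obtain ⟨iv, hiv, hb⟩ := hc
      exact ⟨iv, (PySem.List.mem_sorted _ _ _ _).mpr hiv, hb⟩
  have hperm := (List.perm_ext_iff_of_nodup hBnd hAnd).mpr hmem
  apply PySem.List.sorted_eq_of_perm_of_pairwise_lt
  all_goals first | exact hperm | exact hBpw
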